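-- pv_equiv track=rewrite | github.com/kkkkkk0312/CodingTest_Python | 프로그래머스/1/136798. 기사단원의 무기/기사단원의 무기.py | solution
-- ===== SOURCE A (Python) =====
-- def solution(number, limit, power):
--     answer = [0]*(number+1)
--     for i in range(1,number+1):
--         for j in range(i,number+1,i):
--             answer[j]+=1
--             if answer[i]>limit:
--                 answer[i]=power
--                 break
--     return sum(answer)
-- ===== SOURCE B (Python) =====
-- def solution(number, limit, power):
--     # count all divisors of every n in 1..number with a plain complete sieve,
--     # then cap each count at the end (count if <= limit else power) and sum.
--     cnt = [0] * (number + 1)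
--     for d in range(1, number + 1):
--         for m in range(d, number + 1, d):
--             cnt[m] += 1
--     total = 0
--     for c in cnt[1:]:
--         total += c if c <= limit else power
--     return total
-- ===== Notes on version B (the rewrite author's own statement) =====
-- stated objective: simpler
-- what changed: A propagates a single sieve whose inner loop breaks early and overwrites answer[i] with power mid-sieve (so later counts depend on the processing order); B instead computes the complete divisor count of every n with a plain full sieve and applies the cap (count if <= limit else power) in a separate final pass, relying on the non-obvious fact that A's order-dependent early-exit sieve equals this plain capped divisor count.
import Mathlib
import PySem

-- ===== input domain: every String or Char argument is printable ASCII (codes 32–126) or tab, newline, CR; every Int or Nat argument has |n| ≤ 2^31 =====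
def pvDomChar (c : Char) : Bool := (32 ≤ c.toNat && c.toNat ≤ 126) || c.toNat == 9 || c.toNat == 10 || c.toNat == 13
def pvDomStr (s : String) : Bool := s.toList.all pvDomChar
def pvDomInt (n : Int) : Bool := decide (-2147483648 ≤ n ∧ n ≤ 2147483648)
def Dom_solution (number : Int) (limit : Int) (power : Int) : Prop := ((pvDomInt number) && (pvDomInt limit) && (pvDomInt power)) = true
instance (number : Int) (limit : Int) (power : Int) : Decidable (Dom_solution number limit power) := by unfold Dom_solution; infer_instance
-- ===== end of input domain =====

-- B replaces A's order-dependent propagating sieve-with-break by a plain complete divisor-count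
-- sieve followed by a separate capped summation pass (same asymptotic cost; simpler structure).
-- ===== PORT A =====
-- A: single propagating sieve; the inner loop breaks and overwrites answer[i] with power
def innerA (i limit power : Int) (ans : List Int) : List Int → List Int
  | [] => ans
  | j :: rest =>
    let a1 := ans.set j.toNat (ans.getD j.toNat 0 + 1)
    if limit < a1.getD i.toNat 0 then a1.set i.toNat power
    else innerA i limit power a1 rest

def outerA (number limit power : Int) (ans : List Int) : List Int → List Int
  | [] => ans
  | i :: rest =>
    outerA number limit power (innerA i limit power ans (PySem.List.pyRange i (number + 1) i)) rest

def solution (number limit power : Int) : Int :=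
  (outerA number limit power (List.replicate (number + 1).toNat 0)
      (PySem.List.pyRange 1 (number + 1) 1)).foldl (· + ·) 0

-- ===== PORT B =====
-- B: complete divisor-count sieve, then a separate capped summation pass
-- (the mutable Python list cnt is modelled by Array, the exact analogue of in-place cnt[m] += 1)
def bumpMuls (cnt : Array Int) (ms : List Int) : Array Int :=
  ms.foldl (fun c m => c.setIfInBounds m.toNat (c.getD m.toNat 0 + 1)) cnt

def solution_alt (number limit power : Int) : Int :=
  let cnt := (PySem.List.pyRange 1 (number + 1) 1).foldl
    (fun c d => bumpMuls c (PySem.List.pyRange d (number + 1) d))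
    (Array.replicate (number + 1).toNat 0)
  (PySem.List.slice cnt.toList (some 1) none).foldl
    (fun t c => t + (if c ≤ limit then c else power)) 0

-- ===== PRECONDITION & SPEC =====
def Spec_solution (number : Int) (limit : Int) (power : Int) (out : Int) : Prop := out = solution_alt number limit power
instance (number : Int) (limit : Int) (power : Int) (out : Int) : Decidable (Spec_solution number limit power out) := by unfold Spec_solution; infer_instance

-- ===== CLAIM (what is proved, stated in full; the proofs are below) =====
def Claim_equal_solution : Prop := ∀ (number : Int) (limit : Int) (power : Int), Dom_solution number limit power → Spec_solution number limit power (solution number limit power)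

-- ===== LEMMAS AND PROOFS =====

-- list-level model of B's sieve updates, used by the proofs
def bumpMulsL (cnt : List Int) (ms : List Int) : List Int :=
  ms.foldl (fun c m => c.set m.toNat (c.getD m.toNat 0 + 1)) cnt

theorem getD_toList (a : Array Int) (i : ℕ) (d : Int) : a.getD i d = a.toList.getD i d := by
  rw [Array.getD_eq_getD_getElem?, List.getD_eq_getElem?_getD, Array.getElem?_toList]

theorem bumpMuls_toList (a : Array Int) (ms : List Int) :
    (bumpMuls a ms).toList = bumpMulsL a.toList ms := by
  induction ms generalizing a with
  | nil => rfl
  | cons m rest ih =>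
    simp only [bumpMuls, bumpMulsL, List.foldl_cons] at *
    rw [ih, Array.toList_setIfInBounds, getD_toList]

theorem sieve_toList (b : Int) (ds : List Int) (a : Array Int) :
    (ds.foldl (fun c d => bumpMuls c (PySem.List.pyRange d b d)) a).toList
      = ds.foldl (fun c d => bumpMulsL c (PySem.List.pyRange d b d)) a.toList := by
  induction ds generalizing a with
  | nil => rfl
  | cons d rest ih =>
    simp only [List.foldl_cons]
    rw [ih, bumpMuls_toList]

def tauN (m : ℕ) : ℕ := m.divisors.card
def finV (limit power : Int) (m : ℕ) : Int := if (tauN m : Int) ≤ limit then (tauN m : Int) else power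
def pcntA (limit : Int) (k m : ℕ) : Int :=
  ((m.divisors.filter (fun d => d ≤ k ∧ ((tauN d : Int) ≤ limit))).card : Int)
def cntB (k m : ℕ) : Int := ((m.divisors.filter (fun d => d ≤ k)).card : Int)

theorem getD_set_ne (l : List Int) (i j : ℕ) (v : Int) (h : i ≠ j) :
    (l.set i v).getD j 0 = l.getD j 0 := by
  simp [List.getD_eq_getElem?_getD, List.getElem?_set_ne h]

theorem getD_map_range (g : ℕ → Int) {n m : ℕ} (h : m < n) :
    ((List.range n).map g).getD m 0 = g m := by
  simp [List.getD_eq_getElem?_getD, h]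

theorem set_map_range (g : ℕ → Int) {n m : ℕ} (h : m < n) (v : Int) :
    ((List.range n).map g).set m v = (List.range n).map (fun x => if x = m then v else g x) := by
  apply List.ext_getElem
  · simp
  · intro k h1 h2
    have hk : k < n := by simpa using h2
    by_cases hkm : k = m
    · subst hkm
      simp
    · rw [List.getElem_set_ne (fun h' => hkm h'.symm)]
      simp [hkm]


theorem bumpMulsL_map_range (g : ℕ → Int) (n : ℕ) (js : List Int)
    (hmem : ∀ j ∈ js, 0 ≤ j ∧ j < (n : Int)) (hnd : js.Nodup) :
    bumpMulsL ((List.range n).map g) js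
      = (List.range n).map (fun m => g m + (if (m : Int) ∈ js then 1 else 0)) := by
  induction js generalizing g with
  | nil => simp [bumpMulsL]
  | cons j rest ih =>
    obtain ⟨hj0, hjn⟩ := hmem j (List.mem_cons_self ..)
    have hjlt : j.toNat < n := by omega
    have step : bumpMulsL ((List.range n).map g) (j :: rest)
        = bumpMulsL (((List.range n).map g).set j.toNat
            (((List.range n).map g).getD j.toNat 0 + 1)) rest := by
      simp [bumpMulsL]
    rw [step, getD_map_range g hjlt, set_map_range g hjlt]
    rw [ih _ (fun x hx => hmem x (List.mem_cons_of_mem _ hx)) (List.Nodup.of_cons hnd)]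
    apply List.map_congr_left
    intro m hm
    have hmn : m < n := List.mem_range.mp hm
    show (if m = j.toNat then g j.toNat + 1 else g m) + (if (m : Int) ∈ rest then 1 else 0)
        = g m + (if (m : Int) ∈ j :: rest then 1 else 0)
    by_cases hmj : (m : Int) = j
    · have h1 : m = j.toNat := by omega
      have h2 : (m : Int) ∉ rest := by
        rw [hmj]; exact (List.nodup_cons.mp hnd).1
      rw [if_pos h1, if_neg h2, if_pos (List.mem_cons.mpr (Or.inl hmj)), h1]
      ring
    · have h1 : m ≠ j.toNat := by omega
      have hiff : ((m : Int) ∈ j :: rest) ↔ ((m : Int) ∈ rest) := by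
        rw [List.mem_cons]; simp [hmj]
      rw [if_neg h1, if_congr hiff rfl rfl]

theorem innerA_stable (i limit power : Int) (S : List Int) (js : List Int)
    (hS : ¬ limit < S.getD i.toNat 0) (hjs : ∀ j ∈ js, j.toNat ≠ i.toNat) :
    innerA i limit power S js = bumpMulsL S js := by
  induction js generalizing S with
  | nil => simp [innerA, bumpMulsL]
  | cons j rest ih =>
    have hne : j.toNat ≠ i.toNat := hjs j (List.mem_cons_self ..)
    have hget : (S.set j.toNat (S.getD j.toNat 0 + 1)).getD i.toNat 0 = S.getD i.toNat 0 :=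
      getD_set_ne _ _ _ _ hne
    simp only [innerA, bumpMulsL, hget, if_neg hS, List.foldl_cons]
    exact ih _ (by rw [hget]; exact hS) (fun x hx => hjs x (List.mem_cons_of_mem _ hx))

theorem mem_pyRange_step (i : ℕ) (b x : Int) (hi : 0 < i) :
    x ∈ PySem.List.pyRange i b i ↔ (i : Int) ≤ x ∧ x < b ∧ (i : Int) ∣ x := by
  rw [PySem.List.mem_pyRange_iff_of_pos (by exact_mod_cast hi)]
  constructor
  · rintro ⟨h1, h2, h3⟩
    exact ⟨h1, h2, by have := dvd_add h3 (dvd_refl (i : Int)); simpa using this⟩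
  · rintro ⟨h1, h2, h3⟩
    exact ⟨h1, h2, dvd_sub h3 (dvd_refl _)⟩

theorem nodup_pyRange_step (i : ℕ) (b : Int) (hi : 0 < i) :
    (PySem.List.pyRange i b i).Nodup := by
  rw [PySem.List.pyRange_of_pos _ _ (by exact_mod_cast hi)]
  refine List.Nodup.map ?_ List.nodup_range
  intro a b hab
  simp only at hab
  have hi' : (0:Int) < (i:Int) := by exact_mod_cast hi
  have h2 : (a : Int) = (b : Int) := by
    have := mul_left_cancel₀ (ne_of_gt hi') (by omega : (i:Int) * a = (i:Int) * b)
    exact this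
  exact_mod_cast h2

theorem pyRange_step_cons (i : ℕ) (b : Int) (hi : 0 < i) (hib : (i : Int) < b) :
    ∃ rest, PySem.List.pyRange i b i = (i : Int) :: rest ∧ ∀ j ∈ rest, (i : Int) < j := by
  rw [PySem.List.pyRange_of_pos _ _ (by exact_mod_cast hi)]
  have hi' : (0:Int) < (i:Int) := by exact_mod_cast hi
  set M := ((b - i + i - 1) / i).toNat with hM
  have hM1 : 1 ≤ (b - i + i - 1) / i := by
    rw [Int.le_ediv_iff_mul_le hi']
    omega
  have hMpos : 0 < M := by omega
  rw [if_pos hib]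
  obtain ⟨M', hM'⟩ : ∃ M', M = M' + 1 := ⟨M - 1, by omega⟩
  rw [hM', List.range_succ_eq_map]
  refine ⟨(List.range M').map (fun t : ℕ => (i:Int) + (i:Int) * ((t:Int)+1)), ?_, ?_⟩
  · rw [List.map_cons, List.map_map]
    have hfe : ((fun k : ℕ => (i:Int) + i * k) ∘ Nat.succ) = fun t : ℕ => (i:Int) + i * ((t:Int)+1) := by
      funext t
      simp only [Function.comp_apply]
      push_cast
      ring
    rw [hfe]
    norm_num
  · intro j hj
    simp only [List.mem_map] at hj
    obtain ⟨t, _, ht⟩ := hj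
    have ht0 : (0:Int) ≤ (t:Int) := by omega
    nlinarith

theorem tauN_pos {m : ℕ} (hm : 1 ≤ m) : 1 ≤ tauN m :=
  Finset.card_pos.mpr ⟨m, Nat.mem_divisors_self m (by omega)⟩

theorem tauN_le_of_dvd {d m : ℕ} (hm : 1 ≤ m) (h : d ∣ m) : tauN d ≤ tauN m :=
  Finset.card_le_card (Nat.divisors_subset_of_dvd (by omega) h)

theorem pcntA_zero (limit : Int) (m : ℕ) : pcntA limit 0 m = 0 := by
  unfold pcntA
  rw [Finset.filter_false_of_mem, Finset.card_empty]
  · rfl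
  · intro d hd
    have := Nat.pos_of_mem_divisors hd
    rintro ⟨h1, -⟩
    omega

theorem cntB_zero (m : ℕ) : cntB 0 m = 0 := by
  unfold cntB
  rw [Finset.filter_false_of_mem, Finset.card_empty]
  · rfl
  · intro d hd
    have := Nat.pos_of_mem_divisors hd
    omega

theorem pcntA_succ (limit : Int) (k m : ℕ) (hm : 1 ≤ m) :
    pcntA limit (k+1) m
      = pcntA limit k m + (if (k+1) ∣ m ∧ ((tauN (k+1) : Int) ≤ limit) then 1 else 0) := by
  unfold pcntA
  by_cases h : (k+1) ∣ m ∧ ((tauN (k+1) : Int) ≤ limit)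
  · rw [if_pos h]
    have hset : m.divisors.filter (fun d => d ≤ k+1 ∧ ((tauN d : Int) ≤ limit))
        = insert (k+1) (m.divisors.filter (fun d => d ≤ k ∧ ((tauN d : Int) ≤ limit))) := by
      ext d
      simp only [Finset.mem_filter, Finset.mem_insert]
      constructor
      · rintro ⟨hd, hle, hc⟩
        by_cases hdk : d = k+1
        · exact Or.inl hdk
        · exact Or.inr ⟨hd, by omega, hc⟩
      · rintro (rfl | ⟨hd, hle, hc⟩)
        · exact ⟨Nat.mem_divisors.mpr ⟨h.1, by omega⟩, le_refl _, h.2⟩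
        · exact ⟨hd, by omega, hc⟩
    rw [hset, Finset.card_insert_of_notMem]
    · push_cast; ring
    · simp only [Finset.mem_filter]
      rintro ⟨-, h1, -⟩
      omega
  · rw [if_neg h, add_zero]
    congr 1
    apply congrArg Finset.card
    apply Finset.filter_congr
    intro d hd
    have hdvd : d ∣ m := (Nat.mem_divisors.mp hd).1
    constructor
    · rintro ⟨h1, h2⟩
      refine ⟨?_, h2⟩
      rcases Nat.lt_or_ge d (k+1) with h3 | h3
      · omega
      · exfalso
        have : d = k+1 := by omega
        subst this
        exact h ⟨hdvd, h2⟩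
    · rintro ⟨h1, h2⟩
      exact ⟨by omega, h2⟩

theorem cntB_succ (k m : ℕ) (hm : 1 ≤ m) :
    cntB (k+1) m = cntB k m + (if (k+1) ∣ m then 1 else 0) := by
  unfold cntB
  by_cases h : (k+1) ∣ m
  · rw [if_pos h]
    have hset : m.divisors.filter (fun d => d ≤ k+1)
        = insert (k+1) (m.divisors.filter (fun d => d ≤ k)) := by
      ext d
      simp only [Finset.mem_filter, Finset.mem_insert]
      constructor
      · rintro ⟨hd, hle⟩
        by_cases hdk : d = k+1
        · exact Or.inl hdk
        · exact Or.inr ⟨hd, by omega⟩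
      · rintro (rfl | ⟨hd, hle⟩)
        · exact ⟨Nat.mem_divisors.mpr ⟨h, by omega⟩, le_refl _⟩
        · exact ⟨hd, by omega⟩
    rw [hset, Finset.card_insert_of_notMem]
    · push_cast; ring
    · simp only [Finset.mem_filter]
      rintro ⟨-, h1⟩
      omega
  · rw [if_neg h, add_zero]
    congr 1
    apply congrArg Finset.card
    apply Finset.filter_congr
    intro d hd
    have hdvd : d ∣ m := (Nat.mem_divisors.mp hd).1
    constructor
    · intro h1
      rcases Nat.lt_or_ge d (k+1) with h3 | h3
      · omega
      · exfalso
        have : d = k+1 := by omega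
        subst this
        exact h hdvd
    · intro h1
      omega

theorem cntB_total (N m : ℕ) (_hm : 1 ≤ m) (hmN : m ≤ N) : cntB N m = (tauN m : Int) := by
  unfold cntB tauN
  congr 2
  apply Finset.filter_true_of_mem
  intro d hd
  have := Nat.divisor_le hd
  omega

theorem pcntA_self_le (limit : Int) (m : ℕ) (hm : 1 ≤ m) (h : (tauN m : Int) ≤ limit) :
    pcntA limit (m-1) m = (tauN m : Int) - 1 := by
  unfold pcntA
  have hset : m.divisors.filter (fun d => d ≤ m-1 ∧ ((tauN d : Int) ≤ limit))
      = m.divisors.erase m := by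
    ext d
    simp only [Finset.mem_filter, Finset.mem_erase]
    constructor
    · rintro ⟨hd, h1, -⟩
      have := Nat.divisor_le hd
      exact ⟨by omega, hd⟩
    · rintro ⟨hne, hd⟩
      have hle := Nat.divisor_le hd
      have hdvd := (Nat.mem_divisors.mp hd).1
      refine ⟨hd, by omega, le_trans ?_ h⟩
      exact_mod_cast tauN_le_of_dvd hm hdvd
  rw [hset, Finset.card_erase_of_mem (Nat.mem_divisors_self m (by omega))]
  have := tauN_pos hm
  unfold tauN at *
  push_cast [Nat.cast_sub this]
  ring

theorem pcntA_self_gt (limit : Int) (m : ℕ) (hm : 1 ≤ m) (h : limit < (tauN m : Int)) :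
    limit ≤ pcntA limit (m-1) m := by
  rcases le_or_gt limit 0 with hl | hl
  · exact le_trans hl (by unfold pcntA; positivity)
  · set l := limit.toNat with hldef
    have hlim : (l : Int) = limit := Int.toNat_of_nonneg (by omega)
    have hlt : l < tauN m := by omega
    set e := m.divisors.orderIsoOfFin (rfl : m.divisors.card = tauN m) with he
    -- D k : the (k+1)-st smallest divisor of m
    have hDmem : ∀ k : Fin (tauN m), ((e k : ℕ) ∈ m.divisors) := fun k => (e k).2
    have hDdvd : ∀ k : Fin (tauN m), ((e k : ℕ) ∣ m) := fun k => (Nat.mem_divisors.mp (hDmem k)).1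
    have hDpos : ∀ k : Fin (tauN m), 0 < (e k : ℕ) := fun k => Nat.pos_of_mem_divisors (hDmem k)
    -- C1: tauN (e k) ≤ k + 1
    have hC1 : ∀ k : Fin (tauN m), tauN (e k : ℕ) ≤ (k : ℕ) + 1 := by
      intro k
      have hsub : ((e k : ℕ)).divisors ⊆ m.divisors.filter (fun x => x ≤ (e k : ℕ)) := by
        intro x hx
        have hxd := (Nat.mem_divisors.mp hx).1
        refine Finset.mem_filter.mpr ⟨Nat.mem_divisors.mpr ⟨hxd.trans (hDdvd k), by omega⟩, ?_⟩
        exact Nat.le_of_dvd (hDpos k) hxd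
      have hcard : (m.divisors.filter (fun x => x ≤ (e k : ℕ))).card ≤ (k : ℕ) + 1 := by
        have hinj : ∀ x ∈ m.divisors.filter (fun x => x ≤ (e k : ℕ)),
            (if hx : x ∈ m.divisors then ((e.symm ⟨x, hx⟩ : Fin (tauN m)) : ℕ) else 0)
              ∈ Finset.range ((k : ℕ) + 1) := by
          intro x hx
          obtain ⟨hx1, hx2⟩ := Finset.mem_filter.mp hx
          rw [dif_pos hx1]
          have : (⟨x, hx1⟩ : m.divisors) ≤ e k := by
            exact Subtype.mk_le_mk.mpr hx2
          have h2 : e.symm ⟨x, hx1⟩ ≤ k := by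
            rw [← e.le_iff_le]
            simpa using this
          simp only [Finset.mem_range]
          omega
        refine le_trans (Finset.card_le_card_of_injOn _ hinj ?_) (by rw [Finset.card_range])
        intro x hx y hy hxy
        obtain ⟨hx1, -⟩ := Finset.mem_filter.mp (Finset.mem_coe.mp hx)
        obtain ⟨hy1, -⟩ := Finset.mem_filter.mp (Finset.mem_coe.mp hy)
        simp only at hxy
        rw [dif_pos hx1, dif_pos hy1] at hxy
        have h3 : (e.symm ⟨x, hx1⟩) = (e.symm ⟨y, hy1⟩) := Fin.ext hxy
        have h4 := congrArg e h3
        simp only [OrderIso.apply_symm_apply] at h4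
        exact congrArg Subtype.val h4
      exact le_trans (Finset.card_le_card hsub) hcard
    -- C2: for k < l, e k < m
    have hC2 : ∀ k : Fin (tauN m), (k : ℕ) < l → (e k : ℕ) < m := by
      intro k hk
      have hle : (e k : ℕ) ≤ m := Nat.le_of_dvd (by omega) (hDdvd k)
      rcases Nat.lt_or_ge (e k : ℕ) m with h1 | h1
      · exact h1
      · exfalso
        have heq : (e k : ℕ) = m := by omega
        have := hC1 k
        rw [heq] at this
        omega
    -- inject Finset.range l into the filter set
    have hmain : l ≤ (m.divisors.filter (fun d => d ≤ m-1 ∧ ((tauN d : Int) ≤ limit))).card := by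
      have hmaps : ∀ t ∈ Finset.range l,
          (if ht : t < tauN m then ((e ⟨t, ht⟩ : ℕ)) else 0)
            ∈ m.divisors.filter (fun d => d ≤ m-1 ∧ ((tauN d : Int) ≤ limit)) := by
        intro t ht
        have htl : t < l := Finset.mem_range.mp ht
        have htm : t < tauN m := by omega
        rw [dif_pos htm]
        refine Finset.mem_filter.mpr ⟨hDmem _, ?_, ?_⟩
        · exact Nat.le_pred_of_lt (hC2 ⟨t, htm⟩ htl)
        · have := hC1 ⟨t, htm⟩
          have h2 : (tauN (e ⟨t, htm⟩ : ℕ) : Int) ≤ (t : Int) + 1 := by exact_mod_cast this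
          omega
      have hinj : Set.InjOn (fun t => if ht : t < tauN m then ((e ⟨t, ht⟩ : ℕ)) else 0)
          (Finset.range l) := by
        intro x hx y hy hxy
        have hxl := Finset.mem_range.mp (Finset.mem_coe.mp hx)
        have hyl := Finset.mem_range.mp (Finset.mem_coe.mp hy)
        have hxm : x < tauN m := by omega
        have hym : y < tauN m := by omega
        simp only at hxy
        rw [dif_pos hxm, dif_pos hym] at hxy
        have : e ⟨x, hxm⟩ = e ⟨y, hym⟩ := Subtype.ext hxy
        have := e.injective this
        simpa using congrArg Fin.val this
      have := Finset.card_le_card_of_injOn _ hmaps hinj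
      simpa using this
    have hfin : (l : Int) ≤ pcntA limit (m-1) m := by
      unfold pcntA
      exact_mod_cast hmain
    omega

def gA (limit power : Int) (k m : ℕ) : Int :=
  if m = 0 then 0 else if m ≤ k then finV limit power m else pcntA limit k m
def gB (k m : ℕ) : Int := if m = 0 then 0 else cntB k m

theorem stepB (N k : ℕ) (_hk : k < N) :
    bumpMulsL ((List.range (N+1)).map (gB k))
        (PySem.List.pyRange ((k+1 : ℕ) : Int) ((N : Int)+1) ((k+1 : ℕ) : Int))
      = (List.range (N+1)).map (gB (k+1)) := by
  set js := PySem.List.pyRange ((k+1 : ℕ) : Int) ((N : Int)+1) ((k+1 : ℕ) : Int) with hjs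
  have hmem : ∀ x : Int, x ∈ js ↔ ((k+1 : ℕ) : Int) ≤ x ∧ x < (N : Int)+1 ∧ ((k+1 : ℕ) : Int) ∣ x :=
    fun x => mem_pyRange_step (k+1) _ x (by omega)
  rw [bumpMulsL_map_range _ _ _
    (fun j hj => by
      have := (hmem j).mp hj
      constructor <;> [omega; exact this.2.1])
    (nodup_pyRange_step (k+1) _ (by omega))]
  apply List.map_congr_left
  intro m hm
  have hmn : m < N + 1 := List.mem_range.mp hm
  by_cases hm0 : m = 0
  · subst hm0
    have h0 : ((0:ℕ) : Int) ∉ js := by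
      rw [hmem]
      rintro ⟨h1, -, -⟩
      omega
    rw [if_neg h0]
    simp [gB]
  · have h1 : 1 ≤ m := by omega
    have hiff : ((m : Int) ∈ js) ↔ (k+1) ∣ m := by
      rw [hmem]
      constructor
      · rintro ⟨-, -, h3⟩
        exact_mod_cast h3
      · intro hdvd
        have := Nat.le_of_dvd (by omega) hdvd
        refine ⟨by exact_mod_cast this, by exact_mod_cast hmn, by exact_mod_cast hdvd⟩
    simp only [gB, if_neg hm0]
    rw [cntB_succ k m h1, if_congr hiff rfl rfl]

theorem stepA (N k : ℕ) (hk : k < N) (limit power : Int) :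
    innerA ((k+1 : ℕ) : Int) limit power ((List.range (N+1)).map (gA limit power k))
        (PySem.List.pyRange ((k+1 : ℕ) : Int) ((N : Int)+1) ((k+1 : ℕ) : Int))
      = (List.range (N+1)).map (gA limit power (k+1)) := by
  have htoNat : (((k+1 : ℕ) : Int)).toNat = k + 1 := by omega
  have hkn : k + 1 < N + 1 := by omega
  obtain ⟨rest, hcons, hgt⟩ :=
    pyRange_step_cons (k+1) ((N : Int)+1) (by omega) (by exact_mod_cast hkn)
  have hnd : (((k+1 : ℕ) : Int) :: rest).Nodup := by
    rw [← hcons]; exact nodup_pyRange_step (k+1) _ (by omega)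
  have hnotmem : ((k+1 : ℕ) : Int) ∉ rest := (List.nodup_cons.mp hnd).1
  have hmemjs : ∀ x : Int, x ∈ (((k+1 : ℕ) : Int) :: rest)
      ↔ ((k+1 : ℕ) : Int) ≤ x ∧ x < (N : Int)+1 ∧ ((k+1 : ℕ) : Int) ∣ x := by
    intro x
    rw [← hcons]
    exact mem_pyRange_step (k+1) _ x (by omega)
  rw [hcons]
  -- the first iteration: j = k+1
  have hgA : gA limit power k (k+1) = pcntA limit k (k+1) := by
    simp [gA]
  have hget : ((List.range (N+1)).map (gA limit power k)).getD (k+1) 0 = pcntA limit k (k+1) := by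
    rw [getD_map_range _ hkn, hgA]
  simp only [innerA, htoNat, hget, set_map_range _ hkn, getD_map_range _ hkn, if_true]
  set g1 : ℕ → Int := fun x => if x = k+1 then pcntA limit k (k+1) + 1 else gA limit power k x
    with hg1
  have hrest_mem : ∀ j ∈ rest, 0 ≤ j ∧ j < ((N+1 : ℕ) : Int) := by
    intro j hj
    have := (hmemjs j).mp (List.mem_cons_of_mem _ hj)
    constructor <;> [omega; (push_cast; omega)]
  by_cases hcap : (tauN (k+1) : Int) ≤ limit
  · -- no break: check fails on every iteration
    have hpc : pcntA limit k (k+1) = (tauN (k+1) : Int) - 1 := by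
      have := pcntA_self_le limit (k+1) (by omega) hcap
      simpa using this
    have hnolt : ¬ limit < pcntA limit k (k+1) + 1 := by omega
    rw [if_neg hnolt]
    have hstable : ∀ j ∈ rest, j.toNat ≠ (((k+1:ℕ)  : Int)).toNat := by
      intro j hj
      have := hgt j hj
      omega
    rw [innerA_stable _ _ _ _ _ (by rw [htoNat, getD_map_range _ hkn]; simpa [g1] using hnolt) hstable]
    rw [bumpMulsL_map_range g1 (N+1) rest hrest_mem (List.Nodup.of_cons hnd)]
    apply List.map_congr_left
    intro m hm
    have hmn : m < N + 1 := List.mem_range.mp hm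
    show g1 m + (if (m : Int) ∈ rest then 1 else 0) = gA limit power (k+1) m
    by_cases hm0 : m = 0
    · subst hm0
      have h0 : ((0:ℕ) : Int) ∉ rest := by
        intro h
        have := hgt _ h
        omega
      rw [if_neg h0]
      simp [g1, gA]
    · by_cases hmk : m = k+1
      · subst hmk
        rw [if_neg (by exact_mod_cast hnotmem)]
        simp only [g1, if_pos rfl, gA, if_neg (by omega : ¬ k+1 = 0),
          if_pos (le_refl (k+1)), finV, if_pos hcap, hpc]
        ring
      · have hg1m : g1 m = gA limit power k m := by simp [g1, hmk]
        rw [hg1m]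
        rcases Nat.lt_or_ge m (k+1) with hlt | hge
        · have h0 : ((m:ℕ) : Int) ∉ rest := by
            intro h
            have := hgt _ h
            omega
          rw [if_neg h0]
          simp only [gA, if_neg hm0]
          rw [if_pos (by omega : m ≤ k), if_pos (by omega : m ≤ k+1)]
          ring
        · have hgem : k+1 < m := by omega
          have hiff : ((m : Int) ∈ rest) ↔ (k+1) ∣ m := by
            constructor
            · intro h
              have := ((hmemjs m).mp (List.mem_cons_of_mem _ h)).2.2
              exact_mod_cast this
            · intro hdvd
              have h2 : ((m:ℕ) : Int) ∈ (((k+1:ℕ) : Int) :: rest) := by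
                rw [hmemjs]
                refine ⟨by exact_mod_cast Nat.le_of_dvd (by omega) hdvd,
                  by exact_mod_cast hmn, by exact_mod_cast hdvd⟩
              rcases List.mem_cons.mp h2 with h3 | h3
              · exfalso
                have : m = k+1 := by exact_mod_cast h3
                omega
              · exact h3
          simp only [gA, if_neg hm0, if_neg (by omega : ¬ m ≤ k), if_neg (by omega : ¬ m ≤ k+1)]
          rw [pcntA_succ limit k m (by omega), if_congr hiff rfl rfl]
          by_cases hd : (k+1) ∣ m <;> simp [hd, hcap]
  · -- break on the first iteration: answer[i] := power
    have hgtlim : limit < pcntA limit k (k+1) + 1 := by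
      have := pcntA_self_gt limit (k+1) (by omega) (by omega)
      simpa using this
    rw [if_pos hgtlim]
    apply List.map_congr_left
    intro m hm
    have hmn : m < N + 1 := List.mem_range.mp hm
    show (if m = k+1 then power else g1 m) = gA limit power (k+1) m
    by_cases hmk : m = k+1
    · subst hmk
      rw [if_pos rfl]
      simp only [gA, if_neg (by omega : ¬ k+1 = 0), if_pos (le_refl (k+1)), finV]
      rw [if_neg (by omega : ¬ (tauN (k+1) : Int) ≤ limit)]
    · rw [if_neg hmk]
      by_cases hm0 : m = 0
      · subst hm0
        simp [g1, gA]
      · have hg1m : g1 m = gA limit power k m := by simp [g1, hmk]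
        rw [hg1m]
        rcases Nat.lt_or_ge m (k+1) with hlt | hge
        · simp only [gA, if_neg hm0]
          rw [if_pos (by omega : m ≤ k), if_pos (by omega : m ≤ k+1)]
        · simp only [gA, if_neg hm0, if_neg (by omega : ¬ m ≤ k), if_neg (by omega : ¬ m ≤ k+1)]
          rw [pcntA_succ limit k m (by omega)]
          rw [if_neg (by rintro ⟨-, h2⟩; exact hcap h2), add_zero]


theorem outerA_loop (N : ℕ) (limit power : Int) :
    ∀ d k, k + d = N →
      outerA (N : Int) limit power ((List.range (N+1)).map (gA limit power k))
          (PySem.List.pyRange ((k+1 : ℕ) : Int) ((N : Int)+1) 1)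
        = (List.range (N+1)).map (gA limit power N) := by
  intro d
  induction d with
  | zero =>
    intro k hkN
    rw [PySem.List.pyRange_one_eq_nil (by push_cast; omega)]
    simp only [outerA]
    have : k = N := by omega
    subst this
    rfl
  | succ d ih =>
    intro k hkN
    have hk : k < N := by omega
    rw [PySem.List.pyRange_one_cons (by push_cast; omega)]
    simp only [outerA]
    rw [stepA N k hk limit power]
    have hc : ((k+1 : ℕ) : Int) + 1 = ((k+2 : ℕ) : Int) := by push_cast; ring
    rw [hc]
    exact ih (k+1) (by omega)

theorem outerB_loop (N : ℕ) :
    ∀ d k, k + d = N →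
      (PySem.List.pyRange ((k+1 : ℕ) : Int) ((N : Int)+1) 1).foldl
          (fun c x => bumpMulsL c (PySem.List.pyRange x ((N : Int) + 1) x))
          ((List.range (N+1)).map (gB k))
        = (List.range (N+1)).map (gB N) := by
  intro d
  induction d with
  | zero =>
    intro k hkN
    rw [PySem.List.pyRange_one_eq_nil (by push_cast; omega)]
    simp only [List.foldl_nil]
    have : k = N := by omega
    subst this
    rfl
  | succ d ih =>
    intro k hkN
    have hk : k < N := by omega
    rw [PySem.List.pyRange_one_cons (by push_cast; omega)]
    simp only [List.foldl_cons]
    rw [stepB N k hk]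
    have hc : ((k+1 : ℕ) : Int) + 1 = ((k+2 : ℕ) : Int) := by push_cast; ring
    rw [hc]
    exact ih (k+1) (by omega)

theorem foldl_add_eq_sum (l : List Int) (init : Int) : l.foldl (· + ·) init = init + l.sum := by
  induction l generalizing init with
  | nil => simp
  | cons x xs ih => simp [ih]; ring

theorem foldl_addf_eq_sum (f : Int → Int) (l : List Int) (init : Int) :
    l.foldl (fun t c => t + f c) init = init + (l.map f).sum := by
  induction l generalizing init with
  | nil => simp
  | cons x xs ih => simp [ih]; ring

theorem outerA_all (N : ℕ) (limit power : Int) :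
    outerA (N : Int) limit power ((List.range (N+1)).map (gA limit power 0))
        (PySem.List.pyRange 1 ((N : Int)+1) 1)
      = (List.range (N+1)).map (gA limit power N) := by
  have h := outerA_loop N limit power N 0 (by omega)
  simpa using h

theorem outerB_all (N : ℕ) :
    (PySem.List.pyRange 1 ((N : Int)+1) 1).foldl
        (fun c x => bumpMulsL c (PySem.List.pyRange x ((N : Int) + 1) x))
        ((List.range (N+1)).map (gB 0))
      = (List.range (N+1)).map (gB N) := by
  have h := outerB_loop N N 0 (by omega)
  simpa using h

theorem main_eq (number limit power : Int) : solution number limit power = solution_alt number limit power := by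
  rcases le_or_gt number 0 with hn | hn
  · -- trivial: empty outer loops, everything is zero
    have hnil : PySem.List.pyRange 1 (number + 1) 1 = [] :=
      PySem.List.pyRange_one_eq_nil (by omega)
    have hrep : (number + 1).toNat ≤ 1 := by omega
    unfold solution solution_alt
    rw [hnil]
    simp only [outerA, List.foldl_nil]
    rw [foldl_add_eq_sum, List.sum_replicate]
    rw [Array.toList_replicate]
    rw [PySem.List.slice_from _ (by omega : (0:Int) ≤ 1)]
    rw [List.drop_replicate]
    interval_cases h : (number + 1).toNat <;> simp
  · -- main case
    set N := number.toNat with hN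
    have hNpos : 1 ≤ N := by omega
    have hNum : number = (N : Int) := by omega
    have hlen : ((N : Int) + 1).toNat = N + 1 := by omega
    have hinitA : List.replicate (N+1) (0:Int) = (List.range (N+1)).map (gA limit power 0) := by
      rw [List.map_congr_left (g := fun _ => (0:Int))
        (fun m hm => by
          by_cases h0 : m = 0
          · simp [gA, h0]
          · simp [gA, h0, pcntA_zero])]
      simp [List.map_const']
    have hinitB : List.replicate (N+1) (0:Int) = (List.range (N+1)).map (gB 0) := by
      rw [List.map_congr_left (g := fun _ => (0:Int))
        (fun m hm => by
          by_cases h0 : m = 0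
          · simp [gB, h0]
          · simp [gB, h0, cntB_zero])]
      simp [List.map_const']
    unfold solution solution_alt
    conv_lhs => rw [hNum, hlen, hinitA, outerA_all N limit power]
    conv_rhs => rw [hNum, hlen]
    change _ = (PySem.List.slice ((PySem.List.pyRange 1 ((N:Int) + 1) 1).foldl
        (fun c d => bumpMuls c (PySem.List.pyRange d ((N:Int) + 1) d))
        (Array.replicate (N+1) 0)).toList (some 1) none).foldl
      (fun t c => t + (if c ≤ limit then c else power)) 0
    rw [sieve_toList, Array.toList_replicate]
    conv_rhs => rw [hinitB, outerB_all N]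
    rw [PySem.List.slice_from _ (by omega : (0:Int) ≤ 1)]
    rw [foldl_add_eq_sum, foldl_addf_eq_sum]
    simp only [zero_add]
    rw [List.range_succ_eq_map, List.map_cons, List.map_cons, List.sum_cons]
    have hg0 : gA limit power N 0 = 0 := by simp [gA]
    rw [hg0, zero_add, show Int.toNat 1 = 1 from rfl, List.drop_succ_cons, List.drop_zero]
    rw [List.map_map, List.map_map, List.map_map]
    apply congrArg List.sum
    apply List.map_congr_left
    intro t ht
    have htN : t < N := List.mem_range.mp ht
    show gA limit power N (t+1) = (if gB N (t+1) ≤ limit then gB N (t+1) else power)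
    have hcnt : gB N (t+1) = (tauN (t+1) : Int) := by
      simp only [gB, if_neg (by omega : ¬ t+1 = 0)]
      exact cntB_total N (t+1) (by omega) (by omega)
    rw [hcnt]
    simp only [gA, if_neg (by omega : ¬ t+1 = 0), if_pos (by omega : t+1 ≤ N), finV]

-- ===== VERDICT (by name: the statement is the Claim_ definition above) =====
theorem solution_spec : Claim_equal_solution := by
  intro number limit power _
  unfold Spec_solution
  exact main_eq number limit power
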